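-- pv_equiv track=rewrite | github.com/mauriciovillalobos05/algorithmswithrythm | strings/zFunction.py | findZ
-- ===== SOURCE A (Python) =====
-- def findZ(P: str, T: str) -> list[int]:
--     S = P + T
--     Z = [0] * len(S)
--     l, r = 0, 0
--
--     for i in range(1, len(S)):
--         if i < r:
--             Z[i] = min(r - i, Z[i - l])
--         while i + Z[i] < len(S) and S[Z[i]] == S[i + Z[i]]:
--             Z[i] += 1
--         if i + Z[i] > r:
--             l = i
--             r = i + Z[i]
--
--     matches = []
--     for i in range(len(P) + 1, len(S)):
--         if Z[i] >= len(P):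
--             matches.append(i - len(P) - 1)
--     return matches
-- ===== SOURCE B (Python) =====
-- def findZ(P: str, T: str) -> list[int]:
--     S = P + T
--     m = len(P)
--     return [i - m - 1 for i in range(m + 1, len(S)) if S[i:i + m] == P]
-- ===== Notes on version B (the rewrite author's own statement) =====
-- stated objective: simpler
-- what changed: Replaces the Z-array with its l,r two-pointer Z-function computation by a direct naive substring comparison S[i:i+len(P)] == P at each candidate position, keeping A's S = P+T concatenation, loop bounds and index arithmetic.
import Mathlib
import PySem

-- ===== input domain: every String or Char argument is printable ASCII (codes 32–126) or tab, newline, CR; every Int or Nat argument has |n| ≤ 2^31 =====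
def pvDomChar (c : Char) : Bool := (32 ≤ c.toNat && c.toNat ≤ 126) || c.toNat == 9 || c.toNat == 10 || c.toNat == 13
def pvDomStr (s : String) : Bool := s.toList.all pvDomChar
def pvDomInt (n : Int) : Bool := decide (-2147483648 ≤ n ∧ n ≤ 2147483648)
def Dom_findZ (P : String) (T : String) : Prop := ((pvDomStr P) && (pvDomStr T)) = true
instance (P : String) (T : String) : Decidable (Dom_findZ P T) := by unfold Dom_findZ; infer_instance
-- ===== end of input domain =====

-- B replaces the Z-array/two-pointer Z-function pass by a direct naive substring
-- comparison at each candidate position (objective: simpler), keeping A's reporting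
-- loop bounds and index arithmetic; return values are identical on all inputs.

-- ===== PORT A =====
-- the inner `while i + Z[i] < len(S) and S[Z[i]] == S[i + Z[i]]: Z[i] += 1`
-- (loop indices/values in A are provably nonnegative, so they are carried as Nat)
def zwhile (S : List Char) (i z : Nat) : Nat :=
  if h : i + z < S.length ∧ S.getD z 'a' = S.getD (i + z) 'a' then
    zwhile S i (z + 1)
  else z
termination_by S.length - (i + z)
decreasing_by omega

-- one iteration of A's main `for i in range(1, len(S))` loop; state (Z, l, r)
def zstep (S : List Char) (st : List Nat × Nat × Nat) (i : Nat) : List Nat × Nat × Nat :=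
  let Z := st.1
  let l := st.2.1
  let r := st.2.2
  let z0 := if i < r then min (r - i) (Z.getD (i - l) 0) else Z.getD i 0
  let z := zwhile S i z0
  let Z' := Z.set i z
  if r < i + z then (Z', i, i + z) else (Z', l, r)

def findZ (P : String) (T : String) : List Int :=
  let S := P.toList ++ T.toList
  let n := S.length
  let m := P.toList.length
  let st := (List.range' 1 (n - 1)).foldl (zstep S) (List.replicate n 0, 0, 0)
  let Z := st.1
  (List.range' (m + 1) (n - (m + 1))).foldl
    (fun acc i => if m ≤ Z.getD i 0 then acc ++ [(i : Int) - m - 1] else acc) []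

-- ===== PORT B =====
def findZ_alt (P : String) (T : String) : List Int :=
  let S := P.toList ++ T.toList
  let m := P.toList.length
  ((List.range' (m + 1) (S.length - (m + 1))).filter
      (fun i => decide ((S.drop i).take m = P.toList))).map (fun (i : Nat) => (i : Int) - (m : Int) - 1)

-- ===== PRECONDITION & SPEC =====
def Spec_findZ (P : String) (T : String) (out : List Int) : Prop := out = findZ_alt P T
instance (P : String) (T : String) (out : List Int) : Decidable (Spec_findZ P T out) := by unfold Spec_findZ; infer_instance

-- ===== CLAIM (what is proved, stated in full; the proofs are below) =====
def Claim_equal_findZ : Prop := ∀ (P : String) (T : String), Dom_findZ P T → Spec_findZ P T (findZ P T)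

-- ===== LEMMAS AND PROOFS =====

-- length of the longest common prefix of two lists
def lcp : List Char → List Char → Nat
  | _, [] => 0
  | [], _ => 0
  | a :: x, b :: y => if a = b then lcp x y + 1 else 0

theorem lcp_le_right (x y : List Char) : lcp x y ≤ y.length := by
  induction x generalizing y with
  | nil => cases y <;> simp [lcp]
  | cons a x ih =>
    cases y with
    | nil => simp [lcp]
    | cons b y => simp only [lcp]; split <;> simp; exact ih y

theorem lcp_getD (x y : List Char) (j : Nat) (h : j < lcp x y) (d : Char) :
    x.getD j d = y.getD j d := by
  induction x generalizing y j with
  | nil => cases y <;> simp [lcp] at h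
  | cons a x ih =>
    cases y with
    | nil => simp [lcp] at h
    | cons b y =>
      simp only [lcp] at h
      split at h
      · cases j with
        | zero => simpa using ‹a = b›
        | succ j => simpa using ih y j (by omega)
      · omega

theorem lcp_ge (x y : List Char) (z : Nat) (hx : z ≤ x.length) (hy : z ≤ y.length)
    (hm : ∀ j, j < z → x.getD j 'a' = y.getD j 'a') : z ≤ lcp x y := by
  induction x generalizing y z with
  | nil => simp at hx; omega
  | cons a x ih =>
    cases y with
    | nil => simp at hy; omega
    | cons b y =>
      cases z with
      | zero => omega
      | succ z =>
        have hab : a = b := by simpa using hm 0 (by omega)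
        simp only [lcp, if_pos hab]
        have := ih y z (by simpa using hx) (by simpa using hy)
          (fun j hj => by simpa using hm (j + 1) (by omega))
        omega

theorem getD_drop (l : List Char) (i j : Nat) (d : Char) :
    (l.drop i).getD j d = l.getD (i + j) d := by
  simp [List.getD, List.getElem?_drop]

-- the while loop computes the exact Z-value, given a correct partial match as start
theorem zwhile_eq_fuel (fuel : Nat) : ∀ (S : List Char) (i z : Nat),
    S.length - (i + z) ≤ fuel → 1 ≤ i → i + z ≤ S.length →
    (∀ j, j < z → S.getD j 'a' = S.getD (i + j) 'a') →
    zwhile S i z = lcp S (S.drop i) := by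
  induction fuel with
  | zero =>
    intro S i z hf hi hz hm
    rw [zwhile, dif_neg (by omega)]
    have hle : z ≤ lcp S (S.drop i) := by
      refine lcp_ge S (S.drop i) z (by omega) (by simp; omega) ?_
      intro j hj
      rw [getD_drop]; exact hm j hj
    have h2 := lcp_le_right S (S.drop i)
    simp at h2
    omega
  | succ k ih =>
    intro S i z hf hi hz hm
    rw [zwhile]
    split
    · rename_i h
      refine ih S i (z + 1) (by omega) hi (by omega) ?_
      intro j hj
      rcases Nat.lt_or_ge j z with hlt | hge
      · exact hm j hlt
      · have : j = z := by omega
        subst this; exact h.2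
    · rename_i h
      have hle : z ≤ lcp S (S.drop i) := by
        refine lcp_ge S (S.drop i) z (by omega) (by simp; omega) ?_
        intro j hj
        rw [getD_drop]; exact hm j hj
      rcases Nat.lt_or_ge (i + z) S.length with hlt | hge
      · have hne : S.getD z 'a' ≠ S.getD (i + z) 'a' := by
          intro hcontra; exact h ⟨hlt, hcontra⟩
        by_contra hne2
        have hzlt : z < lcp S (S.drop i) := by omega
        have := lcp_getD S (S.drop i) z hzlt 'a'
        rw [getD_drop] at this
        exact hne this
      · have h2 := lcp_le_right S (S.drop i)
        simp at h2
        omega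

theorem zwhile_eq (S : List Char) (i z : Nat) (hi : 1 ≤ i) (hz : i + z ≤ S.length)
    (hm : ∀ j, j < z → S.getD j 'a' = S.getD (i + j) 'a') :
    zwhile S i z = lcp S (S.drop i) := by
  exact zwhile_eq_fuel (S.length - (i + z)) S i z le_rfl hi hz hm

-- the invariant of A's main loop
def ZInv (S : List Char) (i : Nat) (st : List Nat × Nat × Nat) : Prop :=
  st.1.length = S.length ∧
  (∀ j, st.1.getD j 0 = if 1 ≤ j ∧ j < i then lcp S (S.drop j) else 0) ∧
  ((st.2.1 = 0 ∧ st.2.2 = 0) ∨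
    (1 ≤ st.2.1 ∧ st.2.1 < i ∧ st.2.2 = st.2.1 + lcp S (S.drop st.2.1)))

theorem getD_set (l : List Nat) (i j v : Nat) (hi : i < l.length) :
    (l.set i v).getD j 0 = if j = i then v else l.getD j 0 := by
  simp only [List.getD, List.getElem?_set]
  by_cases h : i = j
  · rw [if_pos h, if_pos (by omega : i < l.length), if_pos h.symm]; rfl
  · rw [if_neg h, if_neg (fun hh => h hh.symm)]

theorem zinv_step (S : List Char) (i : Nat) (st : List Nat × Nat × Nat)
    (hi : 1 ≤ i) (hin : i < S.length) (h : ZInv S i st) :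
    ZInv S (i + 1) (zstep S st i) := by
  obtain ⟨hlen, hZ, hbox⟩ := h
  set Z := st.1 with hZdef
  set l := st.2.1 with hldef
  set r := st.2.2 with hrdef
  -- the start value fed to the while loop is a valid partial match
  have hstart : ∀ z0, z0 = (if i < r then min (r - i) (Z.getD (i - l) 0) else Z.getD i 0) →
      i + z0 ≤ S.length ∧ ∀ j, j < z0 → S.getD j 'a' = S.getD (i + j) 'a' := by
    intro z0 hz0
    by_cases hir : i < r
    · rw [if_pos hir] at hz0
      rcases hbox with ⟨hl0, hr0⟩ | ⟨hl1, hli, hr⟩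
      · omega
      · have hil : 1 ≤ i - l ∧ i - l < i := by omega
        have hZil : Z.getD (i - l) 0 = lcp S (S.drop (i - l)) := by
          rw [hZ]; rw [if_pos ⟨hil.1, hil.2⟩]
        have hrn : r ≤ S.length := by
          have := lcp_le_right S (S.drop l)
          simp at this; omega
        constructor
        · omega
        · intro j hj
          have hj1 : j < r - i := by omega
          have hj2 : j < lcp S (S.drop (i - l)) := by rw [hZil] at hz0; omega
          -- S[i+j] = S[(i+j)-l] by the box property, = S[(i-l)+j]
          have hbox2 : S.getD ((i - l) + j) 'a' = S.getD (i + j) 'a' := by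
            have hk : (i - l) + j < lcp S (S.drop l) := by omega
            have := lcp_getD S (S.drop l) ((i - l) + j) hk 'a'
            rw [getD_drop] at this
            have harith : l + ((i - l) + j) = i + j := by omega
            rw [harith] at this
            exact this
          have hpre : S.getD j 'a' = S.getD ((i - l) + j) 'a' := by
            have := lcp_getD S (S.drop (i - l)) j hj2 'a'
            rw [getD_drop] at this
            exact this
          rw [hpre, hbox2]
    · rw [if_neg hir] at hz0
      have : Z.getD i 0 = 0 := by rw [hZ, if_neg (by omega)]
      rw [this] at hz0
      subst hz0
      exact ⟨by omega, fun j hj => absurd hj (by omega)⟩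
  have hmain : zwhile S i (if i < r then min (r - i) (Z.getD (i - l) 0) else Z.getD i 0)
      = lcp S (S.drop i) := by
    obtain ⟨h1, h2⟩ := hstart _ rfl
    exact zwhile_eq S i _ hi h1 h2
  unfold zstep ZInv
  simp only [← hZdef, ← hldef, ← hrdef, hmain]
  have hset : ∀ j, (Z.set i (lcp S (S.drop i))).getD j 0
      = if 1 ≤ j ∧ j < i + 1 then lcp S (S.drop j) else 0 := by
    intro j
    rw [getD_set Z i j _ (by omega)]
    by_cases hji : j = i
    · subst hji; simp; omega
    · rw [if_neg hji, hZ]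
      by_cases hc : 1 ≤ j ∧ j < i
      · rw [if_pos hc, if_pos ⟨hc.1, by omega⟩]
      · rw [if_neg hc, if_neg (by omega)]
  split
  · exact ⟨by simp [hlen], hset, Or.inr ⟨hi, Nat.lt_succ_self i, rfl⟩⟩
  · refine ⟨by simp [hlen], hset, ?_⟩
    rcases hbox with ⟨hl0, hr0⟩ | ⟨hl1, hli, hr⟩
    · exact Or.inl ⟨hl0, hr0⟩
    · exact Or.inr ⟨hl1, Nat.lt_succ_of_lt hli, hr⟩

theorem zinv_fold (S : List Char) : ∀ (cnt a : Nat) (st : List Nat × Nat × Nat),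
    1 ≤ a → a + cnt ≤ S.length → ZInv S a st →
    ZInv S (a + cnt) ((List.range' a cnt).foldl (zstep S) st) := by
  intro cnt
  induction cnt with
  | zero => intro a st _ _ h; simpa using h
  | succ k ih =>
    intro a st ha hcnt h
    rw [List.range'_succ, List.foldl_cons]
    have := ih (a + 1) (zstep S st a) (by omega) (by omega)
      (zinv_step S a st ha (by omega) h)
    have harith : a + 1 + k = a + (k + 1) := by omega
    rwa [harith] at this

theorem zinv_init (S : List Char) : ZInv S 1 (List.replicate S.length 0, 0, 0) := by
  refine ⟨by simp, ?_, Or.inl ⟨rfl, rfl⟩⟩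
  intro j
  rw [if_neg (by omega)]
  simp [List.getD, List.getElem?_replicate]
  split <;> rfl

-- final Z array is the exact Z-function
theorem Z_final (S : List Char) (j : Nat) (hj : 1 ≤ j) :
    ((List.range' 1 (S.length - 1)).foldl (zstep S) (List.replicate S.length 0, 0, 0)).1.getD j 0
      = if j < S.length then lcp S (S.drop j) else 0 := by
  rcases Nat.eq_zero_or_pos S.length with h0 | hpos
  · have he : S.length - 1 = 0 := by omega
    rw [he, h0]
    simp [List.getD]
  · have := zinv_fold S (S.length - 1) 1 _ (by omega) (by omega) (zinv_init S)
    have harith : 1 + (S.length - 1) = S.length := by omega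
    rw [harith] at this
    obtain ⟨_, hZ, _⟩ := this
    rw [hZ j]
    by_cases hc : j < S.length
    · rw [if_pos ⟨hj, hc⟩, if_pos hc]
    · rw [if_neg (by omega), if_neg hc]

theorem foldl_if_filter_map (p : Nat → Prop) [DecidablePred p] (f : Nat → Int) :
    ∀ (l : List Nat) (acc : List Int),
    l.foldl (fun acc i => if p i then acc ++ [f i] else acc) acc
      = acc ++ (l.filter (fun i => decide (p i))).map f := by
  intro l
  induction l with
  | nil => simp
  | cons x xs ih =>
    intro acc
    simp only [List.foldl_cons, List.filter_cons]
    by_cases hx : p x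
    · rw [if_pos hx, ih]; simp [hx]
    · rw [if_neg hx, ih]; simp [hx]

theorem take_eq_of_pointwise (x y : List Char) (m : Nat) (hx : m ≤ x.length)
    (hy : m ≤ y.length) (h : ∀ j, j < m → x.getD j 'a' = y.getD j 'a') :
    x.take m = y.take m := by
  apply List.ext_getElem
  · simp; omega
  · intro j h1 h2
    simp only [List.getElem_take]
    have hj : j < m := by simp at h1; omega
    have := h j hj
    rwa [List.getD_eq_getElem x 'a' (by omega), List.getD_eq_getElem y 'a' (by omega)] at this

theorem getD_take (l : List Char) (m j : Nat) (hj : j < m) (d : Char) :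
    (l.take m).getD j d = l.getD j d := by
  simp [List.getD, hj]

-- the match test: Z[i] >= m  iff  S[i:i+m] == S[:m]
theorem z_ge_iff (S : List Char) (m i : Nat) (him : m + 1 ≤ i) (hin : i < S.length) :
    (m ≤ lcp S (S.drop i)) ↔ (S.drop i).take m = S.take m := by
  constructor
  · intro h
    refine (take_eq_of_pointwise S (S.drop i) m (by omega) (by
      have := lcp_le_right S (S.drop i); omega) ?_).symm
    intro j hj
    exact lcp_getD S (S.drop i) j (by omega) 'a'
  · intro h
    have hlen : ((S.drop i).take m).length = (S.take m).length := by rw [h]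
    simp at hlen
    have hmn : m ≤ S.length - i := by omega
    refine lcp_ge S (S.drop i) m (by omega) (by simp; omega) ?_
    intro j hj
    have := congrArg (fun t => t.getD j 'a') h
    simp only at this
    rw [getD_take _ m j hj, getD_take _ m j hj] at this
    exact this.symm

-- ===== VERDICT (by name: the statement is the Claim_ definition above) =====
theorem findZ_spec : Claim_equal_findZ := by
  unfold Claim_equal_findZ Spec_findZ
  intro P T _
  unfold findZ findZ_alt
  simp only []
  set S := P.toList ++ T.toList with hS
  set n := S.length with hn
  set m := P.toList.length with hm
  rw [foldl_if_filter_map (fun i => m ≤ _) (fun i => (i : Int) - m - 1)]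
  rw [List.nil_append]
  refine congrArg (List.map _) (List.filter_congr ?_)
  intro i hi
  have hrange := List.mem_range'_1.mp hi
  have him : m + 1 ≤ i := hrange.1
  have hin : i < n := by omega
  have hZ := Z_final S i (by omega)
  rw [if_pos hin] at hZ
  rw [hZ]
  have hP : P.toList = S.take m := by
    rw [hS, hm, List.take_left]
  rw [decide_eq_decide.mpr (z_ge_iff S m i him hin), hP]
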